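-- pv_equiv track=rewrite | github.com/sandnose/advent_of_code_2024 | day2.py | problem_dampener
-- ===== SOURCE A (Python) =====
-- def check_safe_report(levels: list) -> bool:
--     """
--     Checking the two primary rules
--     """
--     is_increasing = all(i < j for i, j in zip(levels, levels[1:]))
--     is_decreasing = all(i > j for i, j in zip(levels, levels[1:]))
--     monotonic = is_increasing or is_decreasing
--     adjacent_diff = all(1 <= abs(i - j) <= 3 for i, j in zip(levels, levels[1:]))
--     return monotonic and adjacent_diff
--
-- def problem_dampener(levels: list) -> bool:
--     """
--     Removing 1 level from failing report
--     Pass if sub_level passes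
--     """
--     # if it just fits then pass true
--     if check_safe_report(levels):
--         return True
--
--     for i in range(len(levels)):
--         new_levels = levels[:i] + levels[i + 1 :]
--         if check_safe_report(new_levels):
--             return True
--
--     # if the two other returns doesnt ahppen
--     return False
-- ===== SOURCE B (Python) =====
-- def problem_dampener(levels: list) -> bool:
--     """
--     Single scan per direction: locate the first adjacent-pair violation and
--     test only the two removals that can repair it (O(n) instead of O(n^2)).
--     """
--     def first_viol(xs, ok):
--         i = 0
--         while i + 1 < len(xs):
--             if not ok(xs[i], xs[i + 1]):
--                 return i
--             i += 1
--         return None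
--
--     def dir_ok(xs, ok):
--         i = first_viol(xs, ok)
--         if i is None:
--             return True
--         return (first_viol(xs[:i] + xs[i + 1:], ok) is None
--                 or first_viol(xs[:i + 1] + xs[i + 2:], ok) is None)
--
--     inc = lambda a, b: 1 <= b - a <= 3
--     dec = lambda a, b: 1 <= a - b <= 3
--     return dir_ok(levels, inc) or dir_ok(levels, dec)
-- ===== Notes on version B (the rewrite author's own statement) =====
-- stated objective: faster
-- what changed: Instead of re-checking safety of all n one-element-removed copies, B scans once per direction for the first adjacent-pair violation and tests only the two removals (that index and its successor) that can possibly repair it.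
import Mathlib
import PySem

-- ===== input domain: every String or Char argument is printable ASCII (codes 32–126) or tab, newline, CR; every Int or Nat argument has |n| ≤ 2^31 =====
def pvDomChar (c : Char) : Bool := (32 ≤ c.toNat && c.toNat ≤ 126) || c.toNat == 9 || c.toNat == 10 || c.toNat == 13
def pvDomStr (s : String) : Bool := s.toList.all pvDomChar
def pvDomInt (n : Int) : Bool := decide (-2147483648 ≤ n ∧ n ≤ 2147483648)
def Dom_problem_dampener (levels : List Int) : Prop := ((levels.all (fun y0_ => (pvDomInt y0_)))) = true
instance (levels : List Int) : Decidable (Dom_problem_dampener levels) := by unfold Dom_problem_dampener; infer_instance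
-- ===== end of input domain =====

-- B replaces A's scan over all n one-element removals by one scan per direction that finds
-- the first violating adjacent pair and tests only the two removals that can repair it (faster).

-- ===== PORT A =====
def check_safe_report (levels : List Int) : Bool :=
  let pairs := levels.zip levels.tail
  let is_increasing := pairs.all (fun p => decide (p.1 < p.2))
  let is_decreasing := pairs.all (fun p => decide (p.1 > p.2))
  let monotonic := is_increasing || is_decreasing
  let adjacent_diff := pairs.all (fun p => decide (1 ≤ (p.1 - p.2).natAbs ∧ (p.1 - p.2).natAbs ≤ 3))
  monotonic && adjacent_diff

def problem_dampener (levels : List Int) : Bool :=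
  if check_safe_report levels then true
  else (List.range levels.length).any (fun i => check_safe_report (levels.take i ++ levels.drop (i + 1)))

-- ===== PORT B =====
def okInc (a b : Int) : Bool := decide (1 ≤ b - a ∧ b - a ≤ 3)
def okDec (a b : Int) : Bool := decide (1 ≤ a - b ∧ a - b ≤ 3)

-- Source B's first_viol loop (index i over adjacent pairs) as structural recursion
def firstViol (ok : Int → Int → Bool) : List Int → Option Nat
  | a :: b :: t => if ok a b then (firstViol ok (b :: t)).map (· + 1) else some 0
  | _ => none

def dirOk (xs : List Int) (ok : Int → Int → Bool) : Bool :=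
  match firstViol ok xs with
  | none => true
  | some i =>
      (firstViol ok (xs.take i ++ xs.drop (i + 1))).isNone
        || (firstViol ok (xs.take (i + 1) ++ xs.drop (i + 2))).isNone

def problem_dampener_alt (levels : List Int) : Bool :=
  dirOk levels okInc || dirOk levels okDec

-- ===== PRECONDITION & SPEC =====
def Spec_problem_dampener (levels : List Int) (out : Bool) : Prop := out = problem_dampener_alt levels
instance (levels : List Int) (out : Bool) : Decidable (Spec_problem_dampener levels out) := by unfold Spec_problem_dampener; infer_instance

-- ===== CLAIM (what is proved, stated in full; the proofs are below) =====
def Claim_equal_problem_dampener : Prop := ∀ (levels : List Int), Dom_problem_dampener levels → Spec_problem_dampener levels (problem_dampener levels)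

-- ===== LEMMAS AND PROOFS =====

theorem fv_none (ok : Int → Int → Bool) (l : List Int) :
    firstViol ok l = none ↔
      ∀ k, (h : k + 1 < l.length) → ok (l[k]'(by omega)) (l[k + 1]'h) = true := by
  induction l with
  | nil => simp [firstViol]
  | cons a t ih =>
    cases t with
    | nil => simp [firstViol]
    | cons b t' =>
      by_cases hab : ok a b = true
      · simp only [firstViol, hab, if_pos, Option.map_eq_none_iff]
        rw [ih]
        constructor
        · intro H k hk
          cases k with
          | zero => simpa using hab
          | succ k => exact H k (by simpa using hk)
        · intro H k hk
          exact H (k + 1) (by simpa using hk)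
      · simp only [firstViol, hab, Bool.false_eq_true]
        constructor
        · intro H; exact absurd H (by simp)
        · intro H
          have := H 0 (by simp)
          simp at this
          exact absurd this hab

theorem fv_some (ok : Int → Int → Bool) (l : List Int) (i : Nat)
    (h : firstViol ok l = some i) :
    ∃ (hi : i + 1 < l.length), ok (l[i]'(by omega)) (l[i + 1]'hi) = false := by
  induction l generalizing i with
  | nil => simp [firstViol] at h
  | cons a t ih =>
    cases t with
    | nil => simp [firstViol] at h
    | cons b t' =>
      by_cases hab : ok a b = true
      · simp only [firstViol, hab, if_pos, Option.map_eq_some_iff] at h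
        obtain ⟨j, hj, rfl⟩ := h
        obtain ⟨hlt, hviol⟩ := ih j hj
        exact ⟨by simpa using Nat.succ_lt_succ hlt, by simpa using hviol⟩
      · simp [firstViol, hab] at h
        subst h
        exact ⟨by simp, by simpa using eq_false_of_ne_true hab⟩

theorem fv_erase_ne (ok : Int → Int → Bool) (l : List Int) (i j : Nat)
    (hfv : firstViol ok l = some i) (hj1 : j ≠ i) (hj2 : j ≠ i + 1) :
    firstViol ok (l.take j ++ l.drop (j + 1)) ≠ none := by
  obtain ⟨hi, hviol⟩ := fv_some ok l i hfv
  by_cases hjl : j < l.length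
  · rw [← List.eraseIdx_eq_take_drop_succ l j]
    intro hnone
    rw [fv_none] at hnone
    have hlen : (l.eraseIdx j).length = l.length - 1 := by
      rw [List.length_eraseIdx]; simp [hjl]
    rcases Nat.lt_or_ge j i with hji | hji
    · -- the pair (l[i], l[i+1]) sits at position i-1 in the erased list
      have hk : (i - 1) + 1 < (l.eraseIdx j).length := by omega
      have := hnone (i - 1) hk
      simp only [List.getElem_eraseIdx] at this
      rw [dif_neg (by omega), dif_neg (by omega)] at this
      have e1 : i - 1 + 1 = i := by omega
      have e2 : i - 1 + 1 + 1 = i + 1 := by omega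
      simp only [e1] at this
      rw [hviol] at this
      exact absurd this (by simp)
    · have hji' : i + 2 ≤ j := by omega
      have hk : i + 1 < (l.eraseIdx j).length := by omega
      have := hnone i hk
      simp only [List.getElem_eraseIdx] at this
      rw [dif_pos (by omega), dif_pos (by omega)] at this
      rw [hviol] at this
      exact absurd this (by simp)
  · have h1 : l.take j = l := List.take_of_length_le (by omega)
    have h2 : l.drop (j + 1) = [] := List.drop_eq_nil_of_le (by omega)
    rw [h1, h2, List.append_nil, hfv]
    simp

theorem all_zip_iff (l : List Int) (f : Int × Int → Bool) :
    ((l.zip l.tail).all f = true) ↔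
      ∀ k, (h : k + 1 < l.length) → f ((l[k]'(by omega)), l[k + 1]'h) = true := by
  rw [List.all_eq_true]
  have hlen : (l.zip l.tail).length = l.length - 1 := by
    simp [List.length_zip, List.length_tail]
  constructor
  · intro H k h
    have hk : k < (l.zip l.tail).length := by omega
    have hmem : (l.zip l.tail)[k] ∈ l.zip l.tail := List.getElem_mem hk
    have := H _ hmem
    simpa [List.getElem_zip, List.getElem_tail] using this
  · intro H p hp
    obtain ⟨k, hk, hpk⟩ := List.mem_iff_getElem.1 hp
    have hk' : k + 1 < l.length := by omega
    have := H k hk'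
    rw [← hpk]
    simpa [List.getElem_zip, List.getElem_tail] using this

theorem check_iff (l : List Int) :
    check_safe_report l = true ↔ (firstViol okInc l = none ∨ firstViol okDec l = none) := by
  unfold check_safe_report
  simp only [Bool.and_eq_true, Bool.or_eq_true]
  rw [all_zip_iff, all_zip_iff, all_zip_iff, fv_none, fv_none]
  constructor
  · rintro ⟨hmono | hmono, hadj⟩
    · left; intro k h
      have h1 := hmono k h; have h2 := hadj k h
      simp only [decide_eq_true_eq] at h1 h2
      simp only [okInc, decide_eq_true_eq]; omega
    · right; intro k h
      have h1 := hmono k h; have h2 := hadj k h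
      simp only [decide_eq_true_eq] at h1 h2
      simp only [okDec, decide_eq_true_eq]; omega
  · rintro (h | h)
    · refine ⟨Or.inl fun k hk => ?_, fun k hk => ?_⟩ <;>
      · have := h k hk
        simp only [okInc, decide_eq_true_eq] at this
        simp only [decide_eq_true_eq]; omega
    · refine ⟨Or.inr fun k hk => ?_, fun k hk => ?_⟩ <;>
      · have := h k hk
        simp only [okDec, decide_eq_true_eq] at this
        simp only [decide_eq_true_eq]; omega

theorem dir_iff (ok : Int → Int → Bool) (l : List Int) :
    dirOk l ok = true ↔
      (firstViol ok l = none ∨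
        ∃ j, j < l.length ∧ firstViol ok (l.take j ++ l.drop (j + 1)) = none) := by
  unfold dirOk
  cases h : firstViol ok l with
  | none => simp
  | some i =>
    obtain ⟨hi, -⟩ := fv_some ok l i h
    simp only [Bool.or_eq_true, Option.isNone_iff_eq_none, reduceCtorEq, false_or]
    constructor
    · rintro (hn | hn)
      · exact ⟨i, by omega, hn⟩
      · exact ⟨i + 1, by omega, hn⟩
    · rintro ⟨j, hj, hn⟩
      by_cases h1 : j = i
      · left; rw [h1] at hn; exact hn
      by_cases h2 : j = i + 1
      · right; rw [h2] at hn; exact hn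
      · exact absurd hn (fv_erase_ne ok l i j h h1 h2)

theorem pd_iff (l : List Int) :
    problem_dampener l = true ↔
      (check_safe_report l = true ∨
        ∃ j, j < l.length ∧
          check_safe_report (l.take j ++ l.drop (j + 1)) = true) := by
  unfold problem_dampener
  by_cases hc : check_safe_report l = true
  · simp [hc]
  · rw [if_neg hc]
    simp [List.any_eq_true, List.mem_range, hc]

-- ===== VERDICT (by name: the statement is the Claim_ definition above) =====
theorem problem_dampener_spec : Claim_equal_problem_dampener := by
  intro levels _
  unfold Spec_problem_dampener
  rw [Bool.eq_iff_iff, pd_iff]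
  unfold problem_dampener_alt
  rw [Bool.or_eq_true, dir_iff, dir_iff]
  simp only [check_iff]
  constructor
  · rintro ((h | h) | ⟨j, hj, h | h⟩)
    · exact Or.inl (Or.inl h)
    · exact Or.inr (Or.inl h)
    · exact Or.inl (Or.inr ⟨j, hj, h⟩)
    · exact Or.inr (Or.inr ⟨j, hj, h⟩)
  · rintro ((h | ⟨j, hj, h⟩) | (h | ⟨j, hj, h⟩))
    · exact Or.inl (Or.inl h)
    · exact Or.inr ⟨j, hj, Or.inl h⟩
    · exact Or.inl (Or.inr h)
    · exact Or.inr ⟨j, hj, Or.inr h⟩
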